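-- pv_equiv track=rewrite | github.com/Krugger1982/24_1_squirrel | KeyMaster.py | Keymaker
-- ===== SOURCE A (Python) =====
-- def Keymaker(k):
--     A = []
--     for i in range(k):
--         A.append(True)
--     for i in range (2, k+1):   # шаги
--         for j in range(k):     # позиция двери
--             if (j+1) % i == 0:
--                 A[j] = not A[j]
--     for i in range(k):
--         if A[i]:
--             A[i] = '1'
--         else:
--             A[i] = '0'
--     return ''.join(A)
-- ===== SOURCE B (Python) =====
-- def Keymaker(k):
--     # Door n ends open iff n has an odd number of divisors, i.e. n is a perfect square.
--     doors = ['0'] * k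
--     m = 1
--     while m * m <= k:
--         doors[m * m - 1] = '1'
--         m += 1
--     return ''.join(doors)
-- ===== Notes on version B (the rewrite author's own statement) =====
-- stated objective: faster
-- what changed: Replaces the O(k^2) toggle sieve over all step sizes 2..k (plus the bool-to-char rewrite pass) by directly marking the perfect-square doors m*m for m*m <= k, since door n survives iff its divisor count is odd, i.e. n is a square.
import Mathlib
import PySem

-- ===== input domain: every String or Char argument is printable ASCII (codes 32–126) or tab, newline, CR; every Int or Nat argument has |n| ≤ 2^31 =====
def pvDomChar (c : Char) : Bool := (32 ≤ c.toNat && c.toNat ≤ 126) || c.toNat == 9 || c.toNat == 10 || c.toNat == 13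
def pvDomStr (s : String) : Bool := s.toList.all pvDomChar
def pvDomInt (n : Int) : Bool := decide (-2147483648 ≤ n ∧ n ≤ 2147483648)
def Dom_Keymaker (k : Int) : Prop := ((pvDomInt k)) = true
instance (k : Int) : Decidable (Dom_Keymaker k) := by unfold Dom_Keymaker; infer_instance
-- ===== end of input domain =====

-- B replaces A's divisor sieve over all step sizes 2..k by directly marking the
-- perfect-square doors (a door survives iff its number has an odd divisor count, i.e. is a square).

-- ===== PORT A =====
def Keymaker (k : Int) : String :=
  -- A = []; for i in range(k): A.append(True)
  let A0 : List Bool := (PySem.List.pyRange 0 k 1).foldl (fun A _ => A ++ [true]) []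
  -- for i in range(2, k+1): for j in range(k): if (j+1) % i == 0: A[j] = not A[j]
  let A1 : List Bool := (PySem.List.pyRange 2 (k + 1) 1).foldl (fun A i =>
      (PySem.List.pyRange 0 k 1).foldl (fun A j =>
        if PySem.Int.mod (j + 1) i == 0
        then PySem.List.pySetD A j (!(PySem.List.pyGetD A j true))
        else A) A) A0
  -- for i in range(k): A[i] = '1' if A[i] else '0'  — the in-place bool→str overwrite of each
  -- cell, in loop order, is rendered as building the char list cell by cell in the same order;
  -- ''.join of the one-char strings is the string of those chars
  let A2 : List Char := (PySem.List.pyRange 0 k 1).foldl (fun B i =>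
      B ++ [if PySem.List.pyGetD A1 i true then '1' else '0']) []
  String.ofList A2

-- ===== PORT B =====
-- termination measure fact for the while loop below
theorem pvMark_dec (k m : Int) (h : m * m ≤ k) :
    (k + 1 - (m + 1)).toNat < (k + 1 - m).toNat := by
  rcases le_or_gt m 0 with hm | hm
  · have : 0 ≤ m * m := mul_self_nonneg m
    omega
  · have : m ≤ m * m := le_mul_of_one_le_left (by omega) (by omega)
    omega

-- while m * m <= k: doors[m*m-1] = '1'; m += 1
def pvMark (k : Int) (m : Int) (doors : List Char) : List Char :=
  if h : m * m ≤ k then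
    pvMark k (m + 1) (PySem.List.pySetD doors (m * m - 1) '1')
  else doors
termination_by (k + 1 - m).toNat
decreasing_by exact pvMark_dec k m h

def Keymaker_alt (k : Int) : String :=
  -- doors = ['0'] * k
  let doors : List Char := PySem.List.pyRepeat ['0'] k
  String.ofList (pvMark k 1 doors)

-- ===== PRECONDITION & SPEC =====
def Spec_Keymaker (k : Int) (out : String) : Prop := out = Keymaker_alt k
instance (k : Int) (out : String) : Decidable (Spec_Keymaker k out) := by unfold Spec_Keymaker; infer_instance

-- ===== CLAIM (what is proved, stated in full; the proofs are below) =====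
def Claim_equal_Keymaker : Prop := ∀ (k : Int), Dom_Keymaker k → Spec_Keymaker k (Keymaker k)

-- ===== LEMMAS AND PROOFS =====

-- the inner position loop of A, for one step size i
def pvInner (k i : Int) (A : List Bool) : List Bool :=
  (PySem.List.pyRange 0 k 1).foldl (fun A j =>
    if PySem.Int.mod (j + 1) i == 0
    then PySem.List.pySetD A j (!(PySem.List.pyGetD A j true))
    else A) A

theorem pyRange0 (k : Int) :
    PySem.List.pyRange 0 k 1 = (List.range k.toNat).map (fun t : Nat => (t : Int)) := by
  rw [PySem.List.pyRange_one]; simp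

theorem innerAux (i : Int) (n : Nat) (A : List Bool) (hn : n ≤ A.length) :
    ((List.range n).foldl (fun A (j : Nat) =>
      if PySem.Int.mod ((j : Int) + 1) i == 0
      then PySem.List.pySetD A (j : Int) (!(PySem.List.pyGetD A (j : Int) true))
      else A) A).length = A.length ∧
    ∀ j : Nat, ((List.range n).foldl (fun A (j : Nat) =>
      if PySem.Int.mod ((j : Int) + 1) i == 0
      then PySem.List.pySetD A (j : Int) (!(PySem.List.pyGetD A (j : Int) true))
      else A) A)[j]? =
      if j < n then A[j]?.map (fun a => if i ∣ ((j : Int) + 1) then !a else a) else A[j]? := by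
  induction n with
  | zero => simp
  | succ n ih =>
    obtain ⟨ihlen, ihget⟩ := ih (by omega)
    rw [List.range_succ, List.foldl_append]
    set B := ((List.range n).foldl _ A) with hB
    constructor
    · simp only [List.foldl_cons, List.foldl_nil]
      split
      · rw [PySem.List.length_pySetD]; exact ihlen
      · exact ihlen
    · intro j
      simp only [List.foldl_cons, List.foldl_nil]
      have hnB : n < B.length := by omega
      have hgd : PySem.List.pyGetD B (n : Int) true = B[n] := by
        rw [PySem.List.pyGetD_natCast, List.getD_eq_getElem _ _ hnB]
      have hBn : B[n]? = A[n]? := by rw [ihget n]; simp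
      have hdvd : (PySem.Int.mod ((n : Int) + 1) i == 0) = decide (i ∣ ((n : Int) + 1)) := by
        rcases Decidable.em (i ∣ ((n : Int) + 1)) with h | h
        · simp [PySem.Int.mod_eq_zero_iff_dvd, h]
        · simp [h]; intro hc; exact absurd ((PySem.Int.mod_eq_zero_iff_dvd _ _).mp hc) h
      rw [hdvd]
      by_cases hd : i ∣ ((n : Int) + 1)
      · rw [if_pos (by simpa using hd)]
        rw [PySem.List.pySetD_natCast, List.getElem?_set]
        by_cases hj : j = n
        · subst hj
          rw [if_pos rfl, if_pos hnB, if_pos (by omega)]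
          have : A[j]? = some (B[j]) := by
            rw [← hBn]; exact (List.getElem?_eq_getElem hnB)
          rw [this, hgd]
          simp [hd]
        · rw [if_neg (by omega), ihget j]
          rcases Nat.lt_trichotomy j n with h | h | h
          · rw [if_pos h, if_pos (by omega)]
          · omega
          · rw [if_neg (by omega), if_neg (by omega)]
      · rw [if_neg (by simpa using hd), ihget j]
        by_cases hj : j = n
        · subst hj
          rw [if_neg (by omega), if_pos (by omega), ← hBn, List.getElem?_eq_getElem hnB]
          simp [hd]
        · rcases Nat.lt_trichotomy j n with h | h | h
          · rw [if_pos h, if_pos (by omega)]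
          · omega
          · rw [if_neg (by omega), if_neg (by omega)]

theorem pvInner_spec (k i : Int) (A : List Bool) (hA : A.length = k.toNat) :
    (pvInner k i A).length = A.length ∧
    ∀ j : Nat, (pvInner k i A)[j]? =
      A[j]?.map (fun a => if i ∣ ((j : Int) + 1) then !a else a) := by
  obtain ⟨h1, h2⟩ := innerAux i k.toNat A (by omega)
  unfold pvInner
  rw [pyRange0, List.foldl_map]
  refine ⟨h1, fun j => ?_⟩
  rw [h2 j]
  by_cases hj : j < k.toNat
  · rw [if_pos hj]
  · rw [if_neg hj]
    have : A[j]? = none := by rw [List.getElem?_eq_none_iff]; omega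
    rw [this]; rfl

theorem pvOuter_spec (k : Int) (L : List Int) (A : List Bool) (hA : A.length = k.toNat) :
    (L.foldl (fun A i => pvInner k i A) A).length = A.length ∧
    ∀ j : Nat, (L.foldl (fun A i => pvInner k i A) A)[j]? =
      A[j]?.map (fun a =>
        if Odd (L.countP (fun i => decide (i ∣ ((j : Int) + 1)))) then !a else a) := by
  induction L generalizing A with
  | nil =>
    refine ⟨rfl, fun j => ?_⟩
    simp only [List.foldl_nil, List.countP_nil]
    cases A[j]? <;> rfl
  | cons i L ih =>
    obtain ⟨ilen, iget⟩ := pvInner_spec k i A hA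
    obtain ⟨olen, oget⟩ := ih (pvInner k i A) (by omega)
    refine ⟨by rw [List.foldl_cons]; rw [olen, ilen], fun j => ?_⟩
    simp only [List.foldl_cons]
    rw [oget j, iget j, Option.map_map]
    cases hAj : A[j]? with
    | none => rfl
    | some a =>
      simp only [Option.map_some, Function.comp]
      congr 1
      rw [List.countP_cons]
      set c := L.countP (fun i => decide (i ∣ ((j : Int) + 1))) with hc
      by_cases hd : i ∣ ((j : Int) + 1)
      · have hone : (c + if decide (i ∣ ((j : Int) + 1)) = true then 1 else 0) = c + 1 := by
          simp [hd]
        rw [hone, if_pos hd]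
        rcases Nat.even_or_odd c with h | h
        · rw [if_neg (Nat.not_odd_iff_even.mpr h),
            if_pos (Nat.odd_add_one.mpr (Nat.not_odd_iff_even.mpr h))]
        · rw [if_pos h, if_neg (by rw [Nat.odd_add_one]; exact not_not.mpr h),
            Bool.not_not]
      · have hzero : (c + if decide (i ∣ ((j : Int) + 1)) = true then 1 else 0) = c := by
          simp [hd]
        rw [hzero, if_neg hd]

-- number-theory core: a positive n has an odd number of divisors iff it is a perfect square
theorem odd_card_divisors_iff (n : ℕ) (hn : n ≠ 0) :
    Odd n.divisors.card ↔ IsSquare n := by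
  classical
  set D := n.divisors with hD
  set F := D.filter (fun d => d * d = n) with hF
  have hFsub : F ⊆ D := Finset.filter_subset _ _
  have hsum : (∑ _d ∈ D \ F, (1 : ZMod 2)) = 0 := by
    apply Finset.sum_involution (g := fun d _ => n / d)
    · intro a _; decide
    · intro a ha _
      simp only [Finset.mem_sdiff, hF, Finset.mem_filter, not_and] at ha
      obtain ⟨haD, hna⟩ := ha
      have hdvd : a ∣ n := (Nat.mem_divisors.mp haD).1
      intro h
      apply hna haD
      have := Nat.mul_div_cancel' hdvd
      rw [h] at this; exact this
    · intro a ha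
      simp only [Finset.mem_sdiff, hF, Finset.mem_filter, not_and] at ha ⊢
      obtain ⟨haD, hna⟩ := ha
      have hdvd : a ∣ n := (Nat.mem_divisors.mp haD).1
      have hq : n / a ∣ n := Nat.div_dvd_of_dvd hdvd
      refine ⟨Nat.mem_divisors.mpr ⟨hq, hn⟩, ?_⟩
      intro _ hsq
      apply hna haD
      have h1 : a * (n / a) = n := Nat.mul_div_cancel' hdvd
      have h2 : n / a ≠ 0 := by
        intro h; rw [h, mul_zero] at h1; exact hn h1.symm
      have h3 : a * (n / a) = (n / a) * (n / a) := h1.trans hsq.symm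
      have h4 : a = n / a := mul_right_cancel₀ h2 h3
      rw [h4] at h1 ⊢; omega
    · intro a ha
      simp only [Finset.mem_sdiff, hF, Finset.mem_filter, not_and] at ha
      exact Nat.div_div_self (Nat.mem_divisors.mp ha.1).1 hn
  have heven : Even (D \ F).card := by
    rw [Finset.sum_const, nsmul_eq_mul, mul_one] at hsum
    exact ZMod.natCast_eq_zero_iff_even.mp hsum
  have hsplit : D.card = F.card + (D \ F).card := by
    have := Finset.card_sdiff_add_card_eq_card hFsub; omega
  have hcard : F.card = if IsSquare n then 1 else 0 := by
    by_cases hs : IsSquare n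
    · obtain ⟨r, hr⟩ := hs
      have hr0 : r ≠ 0 := by rintro rfl; rw [mul_zero] at hr; exact hn hr
      have hFr : F = {r} := by
        apply Finset.ext; intro d
        simp only [hF, Finset.mem_filter, Finset.mem_singleton, hD, Nat.mem_divisors]
        constructor
        · rintro ⟨_, hdd⟩
          exact Nat.mul_self_inj.mp (hdd.trans hr)
        · rintro rfl; exact ⟨⟨⟨_, hr⟩, hn⟩, hr.symm⟩
      rw [hFr, if_pos ⟨r, hr⟩]; rfl
    · have hFe : F = ∅ := by
        apply Finset.eq_empty_of_forall_notMem; intro d hd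
        simp only [hF, Finset.mem_filter] at hd
        exact hs ⟨d, hd.2.symm⟩
      rw [hFe, if_neg hs]; rfl
  obtain ⟨c, hc⟩ := heven
  constructor
  · intro hodd
    obtain ⟨m, hm⟩ := hodd
    by_contra hs
    rw [if_neg hs] at hcard
    omega
  · intro hs
    rw [if_pos hs] at hcard
    exact ⟨c, by omega⟩

theorem countP_range_eq_card (M : Nat) (p : Nat → Bool) :
    (List.range M).countP p = ((Finset.range M).filter (fun x => p x)).card := by
  simp [Finset.card, Finset.filter, Finset.range, Multiset.range, List.countP_eq_length_filter]

-- A's toggle count for door j+1: all divisors of j+1 except 1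
theorem cnt_eq_card_sub_one (k : Int) (j : Nat) (hj : j < k.toNat) :
    ((PySem.List.pyRange 2 (k + 1) 1).countP (fun i => decide (i ∣ ((j : Int) + 1)))) =
      (j + 1).divisors.card - 1 := by
  set n : Nat := j + 1 with hn
  have hn0 : n ≠ 0 := by omega
  have hcast : ((n : Int)) = (j : Int) + 1 := by push_cast [hn]; ring
  rw [PySem.List.pyRange_one, List.countP_map]
  have hpred : ((fun i => decide (i ∣ ((j : Int) + 1))) ∘ (fun t : Nat => 2 + (t : Int))) =
      fun t : Nat => decide ((2 + t) ∣ n) := by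
    funext t
    simp only [Function.comp, decide_eq_decide, ← hcast]
    constructor
    · intro h; exact_mod_cast h
    · intro h; exact_mod_cast h
  rw [hpred, countP_range_eq_card]
  have hM : (k + 1 - 2).toNat = k.toNat - 1 := by omega
  rw [hM]
  have hbij : ((Finset.range (k.toNat - 1)).filter
      (fun t => decide ((2 + t) ∣ n) = true)).card = (n.divisors.erase 1).card := by
    apply Finset.card_bij (fun t _ => 2 + t)
    · intro t ht
      simp only [Finset.mem_filter, Finset.mem_range] at ht
      simp only [Finset.mem_erase, Nat.mem_divisors]
      exact ⟨by omega, of_decide_eq_true ht.2, hn0⟩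
    · intro a _ b _ h; omega
    · intro d hd
      simp only [Finset.mem_erase, Nat.mem_divisors] at hd
      obtain ⟨hd1, hdvd, _⟩ := hd
      have hdpos : 0 < d := Nat.pos_of_dvd_of_pos hdvd (by omega)
      have hdle : d ≤ n := Nat.le_of_dvd (by omega) hdvd
      refine ⟨d - 2, ?_, by omega⟩
      simp only [Finset.mem_filter, Finset.mem_range]
      constructor
      · omega
      · have : 2 + (d - 2) = d := by omega
        rw [this]; exact decide_eq_true hdvd
  rw [hbij, Finset.card_erase_of_mem (Nat.one_mem_divisors.mpr hn0)]

theorem pvMark_spec (k : Int) (fuel : Nat) : ∀ (m : Int) (doors : List Char),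
    fuel = (k + 1 - m).toNat → 1 ≤ m → doors.length = k.toNat →
    (pvMark k m doors).length = doors.length ∧
    ∀ j : Nat,
      ((∃ i : Int, m ≤ i ∧ i * i ≤ k ∧ i * i = (j : Int) + 1) →
        (pvMark k m doors)[j]? = some '1') ∧
      (¬ (∃ i : Int, m ≤ i ∧ i * i ≤ k ∧ i * i = (j : Int) + 1) →
        (pvMark k m doors)[j]? = doors[j]?) := by
  induction fuel using Nat.strong_induction_on with
  | _ fuel ih =>
    intro m doors hfuel hm hd
    rw [pvMark]
    by_cases hk : m * m ≤ k
    · rw [dif_pos hk]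
      have hmk : m ≤ k := by nlinarith
      have hlen' : (PySem.List.pySetD doors (m * m - 1) '1').length = k.toNat := by
        rw [PySem.List.length_pySetD]; exact hd
      obtain ⟨rlen, rget⟩ := ih (k + 1 - (m + 1)).toNat (by omega) (m + 1)
        (PySem.List.pySetD doors (m * m - 1) '1') rfl (by omega) hlen'
      refine ⟨by rw [rlen, PySem.List.length_pySetD], fun j => ?_⟩
      obtain ⟨rget1, rget2⟩ := rget j
      have hset : PySem.List.pySetD doors (m * m - 1) '1' =
          doors.set (m * m - 1).toNat '1' :=
        PySem.List.pySetD_of_nonneg doors '1' (by nlinarith [sq_nonneg (m - 1)])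
      constructor
      · rintro ⟨i, h1, h2, h3⟩
        rcases eq_or_lt_of_le h1 with heq | hlt
        · have hmm : m * m = (j : Int) + 1 := by rw [heq]; exact h3
          by_cases hex1 : ∃ i' : Int, m + 1 ≤ i' ∧ i' * i' ≤ k ∧ i' * i' = (j : Int) + 1
          · exact rget1 hex1
          · rw [rget2 hex1, hset]
            have hjlt : j < doors.length := by rw [hd]; omega
            have ht : (m * m - 1).toNat = j := by omega
            rw [ht, List.getElem?_set_self hjlt]
        · exact rget1 ⟨i, by omega, h2, h3⟩
      · intro hne
        have hex1 : ¬ ∃ i' : Int, m + 1 ≤ i' ∧ i' * i' ≤ k ∧ i' * i' = (j : Int) + 1 := by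
          rintro ⟨i', h1, h2, h3⟩; exact hne ⟨i', by omega, h2, h3⟩
        have h1m : (1 : Int) ≤ m * m := by nlinarith [sq_nonneg (m - 1)]
        have hj : ¬ ((j : Int) = m * m - 1) := fun hj => hne ⟨m, le_refl m, hk, by omega⟩
        rw [rget2 hex1, hset, List.getElem?_set_ne (by omega)]
    · rw [dif_neg hk]
      refine ⟨rfl, fun j => ⟨?_, fun _ => rfl⟩⟩
      rintro ⟨i, h1, h2, h3⟩
      have : m * m ≤ i * i := by nlinarith
      omega

-- B's marking condition for door j+1 is exactly "j+1 is a perfect square"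
theorem exists_sq_iff (k : Int) (j : Nat) (hj : j < k.toNat) :
    (∃ i : Int, 1 ≤ i ∧ i * i ≤ k ∧ i * i = (j : Int) + 1) ↔ IsSquare (j + 1) := by
  constructor
  · rintro ⟨i, h1, h2, h3⟩
    refine ⟨i.toNat, ?_⟩
    have hi : ((i.toNat : Int)) = i := Int.toNat_of_nonneg (by omega)
    have hc : ((j + 1 : Nat) : Int) = ((i.toNat * i.toNat : Nat) : Int) := by
      push_cast [hi]; omega
    exact_mod_cast hc
  · rintro ⟨r, hr⟩
    have hr0 : r ≠ 0 := by rintro rfl; omega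
    have h1 : ((r : Int)) * (r : Int) = (j : Int) + 1 := by exact_mod_cast hr.symm
    refine ⟨(r : Int), by exact_mod_cast Nat.one_le_iff_ne_zero.mpr hr0, by omega, h1⟩

-- the A-side result, fully characterised
theorem Keymaker_eq (k : Int) : Keymaker k = String.ofList
    ((List.range k.toNat).map (fun j =>
      if IsSquare (j + 1) then '1' else '0')) := by
  simp only [Keymaker]
  -- A0 is k Trues
  have hA0 : (PySem.List.pyRange 0 k 1).foldl (fun A _ => A ++ [true]) ([] : List Bool) =
      List.replicate k.toNat true := by
    rw [PySem.List.foldl_append_singleton_eq_map (f := fun _ => true), List.nil_append,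
      List.map_const', pyRange0, List.length_map, List.length_range]
  rw [hA0, PySem.List.foldl_append_singleton_eq_map, List.nil_append]
  set A1 := (PySem.List.pyRange 2 (k + 1) 1).foldl (fun A i =>
      (PySem.List.pyRange 0 k 1).foldl (fun A j =>
        if PySem.Int.mod (j + 1) i == 0
        then PySem.List.pySetD A j (!(PySem.List.pyGetD A j true))
        else A) A) (List.replicate k.toNat true) with hA1
  have hA1o : A1 = (PySem.List.pyRange 2 (k + 1) 1).foldl (fun A i => pvInner k i A)
      (List.replicate k.toNat true) := rfl
  obtain ⟨hlen, hget⟩ := pvOuter_spec k (PySem.List.pyRange 2 (k + 1) 1)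
    (List.replicate k.toNat true) (by simp)
  rw [pyRange0, List.map_map]
  congr 1
  apply List.ext_getElem (by simp)
  intro j hj hj'
  simp only [List.getElem_map, List.getElem_range, Function.comp]
  rw [List.length_map, List.length_range] at hj
  -- value of A1 at j
  have hA1j : A1[j]? = some (if Odd ((PySem.List.pyRange 2 (k + 1) 1).countP
      (fun i => decide (i ∣ ((j : Int) + 1)))) then false else true) := by
    rw [hA1o, hget j, List.getElem?_replicate, if_pos hj]
    rfl
  have hgd : PySem.List.pyGetD A1 (j : Int) true =
      (if Odd ((PySem.List.pyRange 2 (k + 1) 1).countP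
        (fun i => decide (i ∣ ((j : Int) + 1)))) then false else true) := by
    rw [PySem.List.pyGetD_natCast, List.getD_eq_getElem?_getD, hA1j]; rfl
  rw [hgd, cnt_eq_card_sub_one k j hj]
  -- parity of (divisor count − 1) vs squareness
  have hn0 : (j + 1) ≠ 0 := by omega
  by_cases hs : IsSquare (j + 1)
  · have hodd := (odd_card_divisors_iff (j + 1) hn0).mpr hs
    obtain ⟨c, hc⟩ := hodd
    have hne : ¬ Odd ((j + 1).divisors.card - 1) := by
      rw [Nat.not_odd_iff_even]; exact ⟨c, by omega⟩
    rw [if_neg hne, if_pos hs]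
    rfl
  · have hpos : 0 < (j + 1).divisors.card :=
      Finset.card_pos.mpr ⟨1, Nat.one_mem_divisors.mpr hn0⟩
    have hnotodd : ¬ Odd (j + 1).divisors.card := fun h =>
      hs ((odd_card_divisors_iff (j + 1) hn0).mp h)
    rw [Nat.not_odd_iff_even] at hnotodd
    obtain ⟨c, hc⟩ := hnotodd
    have hodd : Odd ((j + 1).divisors.card - 1) := ⟨c - 1, by omega⟩
    rw [if_pos hodd, if_neg hs]
    rfl

-- the B-side result, fully characterised
theorem Keymaker_alt_eq (k : Int) : Keymaker_alt k = String.ofList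
    ((List.range k.toNat).map (fun j =>
      if IsSquare (j + 1) then '1' else '0')) := by
  simp only [Keymaker_alt]
  rw [PySem.List.pyRepeat_singleton]
  obtain ⟨hlen, hget⟩ := pvMark_spec k k.toNat 1 (List.replicate k.toNat '0')
    (by omega) (by omega) (by simp)
  congr 1
  apply List.ext_getElem (by simp [hlen])
  intro j hj hj'
  rw [hlen, List.length_replicate] at hj
  simp only [List.getElem_map, List.getElem_range]
  obtain ⟨h1, h2⟩ := hget j
  have hopt : (pvMark k 1 (List.replicate k.toNat '0'))[j]? =
      some ((pvMark k 1 (List.replicate k.toNat '0'))[j]) :=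
    List.getElem?_eq_getElem (by rw [hlen, List.length_replicate]; exact hj)
  by_cases hs : IsSquare (j + 1)
  · have hv := h1 ((exists_sq_iff k j hj).mpr hs)
    rw [hopt] at hv
    rw [if_pos hs]
    exact Option.some_injective _ hv
  · have hv := h2 (fun h => hs ((exists_sq_iff k j hj).mp h))
    rw [hopt, List.getElem?_replicate, if_pos hj] at hv
    rw [if_neg hs]
    exact Option.some_injective _ hv

-- ===== VERDICT (by name: the statement is the Claim_ definition above) =====
theorem Keymaker_spec : Claim_equal_Keymaker := by
  intro k _
  unfold Spec_Keymaker
  rw [Keymaker_eq, Keymaker_alt_eq]
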